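-- pv_equiv track=rewrite | github.com/ShowControl/ShowControl | MuteMap/MuteMap.py | sort_controls
-- ===== SOURCE A (Python) =====
-- def sort_controls(control_list=[]):
--     chlist = []
--     auxlist = []
--     buslist = []
--     mainlist = []
--     for control in control_list:
--         if 'bus' in control:
--             buslist.append(control)
--         elif 'aux' in control:
--             auxlist.append(control)
--         elif 'main' in control:
--             mainlist.append(control)
--         elif 'ch' in control:
--             chlist.append(control)
--     buslist = sorted(buslist)
--     auxlist = sorted(auxlist)
--     mainlist = sorted(mainlist)
--     chlist = sorted(chlist)
--     sorted_controls = chlist + auxlist + buslist + mainlist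
--     return sorted_controls
-- ===== SOURCE B (Python) =====
-- def sort_controls(control_list=[]):
--     def rank(control):
--         if 'bus' in control:
--             return 2
--         if 'aux' in control:
--             return 1
--         if 'main' in control:
--             return 3
--         if 'ch' in control:
--             return 0
--         return None
--     return sorted((c for c in control_list if rank(c) is not None),
--                   key=lambda c: (rank(c), c))
-- ===== Notes on version B (the rewrite author's own statement) =====
-- stated objective: simpler
-- what changed: Replaces four explicit buckets, four separate sorts and a concatenation with one priority-rank helper, a filter and a single keyed sort on (rank, control).
import Mathlib
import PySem

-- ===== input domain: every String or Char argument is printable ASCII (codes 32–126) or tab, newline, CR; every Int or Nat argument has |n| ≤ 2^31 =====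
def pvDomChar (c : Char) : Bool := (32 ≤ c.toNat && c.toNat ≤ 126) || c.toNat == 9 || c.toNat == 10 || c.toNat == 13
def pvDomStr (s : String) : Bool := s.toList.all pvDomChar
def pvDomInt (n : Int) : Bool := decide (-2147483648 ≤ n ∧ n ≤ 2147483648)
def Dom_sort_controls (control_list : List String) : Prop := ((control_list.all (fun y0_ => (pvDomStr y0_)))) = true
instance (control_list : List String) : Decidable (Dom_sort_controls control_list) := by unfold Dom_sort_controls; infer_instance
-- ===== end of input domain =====

-- B replaces A's four buckets + four sorts + concatenation by one priority-rank
-- helper, a filter and a single keyed sort on (rank, control) — simpler, same values.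

-- ===== PORT A =====
-- the loop body of A: append the control to the bucket its first matching substring selects
def pvStepA (st : List String × List String × List String × List String) (control : String) :
    List String × List String × List String × List String :=
  if PySem.Str.isIn "bus" control then (st.1, st.2.1, st.2.2.1 ++ [control], st.2.2.2)
  else if PySem.Str.isIn "aux" control then (st.1, st.2.1 ++ [control], st.2.2.1, st.2.2.2)
  else if PySem.Str.isIn "main" control then (st.1, st.2.1, st.2.2.1, st.2.2.2 ++ [control])
  else if PySem.Str.isIn "ch" control then (st.1 ++ [control], st.2.1, st.2.2.1, st.2.2.2)
  else st

def sort_controls (control_list : List String) : List String :=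
  let st := control_list.foldl pvStepA ([], [], [], [])
  PySem.List.sorted st.1 (fun x => x) false ++ PySem.List.sorted st.2.1 (fun x => x) false ++
    PySem.List.sorted st.2.2.1 (fun x => x) false ++ PySem.List.sorted st.2.2.2 (fun x => x) false

-- ===== PORT B =====
-- B's rank helper: output slot of a control, None if it matches no category
def pvRank? (control : String) : Option Int :=
  if PySem.Str.isIn "bus" control then some 2
  else if PySem.Str.isIn "aux" control then some 1
  else if PySem.Str.isIn "main" control then some 3
  else if PySem.Str.isIn "ch" control then some 0
  else none

def sort_controls_alt (control_list : List String) : List String :=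
  PySem.List.sorted2 (control_list.filter (fun c => (pvRank? c).isSome))
    (fun c => (pvRank? c).getD 0) (fun c => c) false

-- ===== PRECONDITION & SPEC =====
def Spec_sort_controls (control_list : List String) (out : List String) : Prop := out = sort_controls_alt control_list
instance (control_list : List String) (out : List String) : Decidable (Spec_sort_controls control_list out) := by unfold Spec_sort_controls; infer_instance

-- ===== CLAIM (what is proved, stated in full; the proofs are below) =====
def Claim_equal_sort_controls : Prop := ∀ (control_list : List String), Dom_sort_controls control_list → Spec_sort_controls control_list (sort_controls control_list)

-- ===== LEMMAS AND PROOFS =====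

-- the bucket predicates of A's elif chain
def pBus (c : String) : Bool := PySem.Str.isIn "bus" c
def pAux (c : String) : Bool := !PySem.Str.isIn "bus" c && PySem.Str.isIn "aux" c
def pMain (c : String) : Bool := !PySem.Str.isIn "bus" c && !PySem.Str.isIn "aux" c && PySem.Str.isIn "main" c
def pCh (c : String) : Bool := !PySem.Str.isIn "bus" c && !PySem.Str.isIn "aux" c && !PySem.Str.isIn "main" c && PySem.Str.isIn "ch" c

-- B's rank as a total Int function (None handled by filter)
def rnk (c : String) : Int := (pvRank? c).getD 0

-- the lexicographic (rank, control) order both outputs are sorted by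
def rLex (a b : String) : Prop := rnk a < rnk b ∨ (rnk a = rnk b ∧ a ≤ b)

lemma rnk_of_pCh {c : String} (h : pCh c = true) : rnk c = 0 := by
  simp only [pCh, Bool.and_eq_true, Bool.not_eq_true'] at h
  simp only [rnk, pvRank?, h.1.1.1, h.1.1.2, h.1.2, h.2]; simp

lemma rnk_of_pAux {c : String} (h : pAux c = true) : rnk c = 1 := by
  simp only [pAux, Bool.and_eq_true, Bool.not_eq_true'] at h
  simp only [rnk, pvRank?, h.1, h.2]; simp

lemma rnk_of_pBus {c : String} (h : pBus c = true) : rnk c = 2 := by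
  simp only [pBus] at h
  simp only [rnk, pvRank?, h]; simp

lemma rnk_of_pMain {c : String} (h : pMain c = true) : rnk c = 3 := by
  simp only [pMain, Bool.and_eq_true, Bool.not_eq_true'] at h
  simp only [rnk, pvRank?, h.1.1, h.1.2, h.2]; simp

-- A's loop computes the four filters, appended to the incoming buckets
lemma foldl_stepA (xs : List String) :
    ∀ (a b c d : List String),
      xs.foldl pvStepA (a, b, c, d) =
        (a ++ xs.filter pCh, b ++ xs.filter pAux, c ++ xs.filter pBus, d ++ xs.filter pMain) := by
  induction xs with
  | nil => intro a b c d; simp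
  | cons x t ih =>
    intro a b c d
    cases h1 : PySem.Str.isIn "bus" x <;>
      cases h2 : PySem.Str.isIn "aux" x <;>
        cases h3 : PySem.Str.isIn "main" x <;>
          cases h4 : PySem.Str.isIn "ch" x <;>
            simp only [List.foldl_cons, pvStepA, pBus, pAux, pMain, pCh, List.filter_cons,
              h1, h2, h3, h4, Bool.not_true, Bool.not_false, Bool.false_and, Bool.true_and,
              Bool.and_false, Bool.and_true, if_true, if_false, Bool.false_eq_true,
              Bool.true_eq_false, ite_false, ite_true, ih] <;>
            simp [List.append_assoc]

-- the four disjoint filters concatenated are a permutation of the single filter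
lemma four_filters_perm (xs : List String) :
    (xs.filter pCh ++ xs.filter pAux ++ xs.filter pBus ++ xs.filter pMain).Perm
      (xs.filter (fun c => (pvRank? c).isSome)) := by
  induction xs with
  | nil => simp
  | cons x t ih =>
    cases h1 : PySem.Str.isIn "bus" x <;>
      cases h2 : PySem.Str.isIn "aux" x <;>
        cases h3 : PySem.Str.isIn "main" x <;>
          cases h4 : PySem.Str.isIn "ch" x
    all_goals
      simp only [List.filter_cons, pBus, pAux, pMain, pCh, pvRank?,
        h1, h2, h3, h4, Bool.not_true, Bool.not_false, Bool.false_and, Bool.true_and,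
        Bool.and_false, Bool.and_true, Bool.false_or, Bool.true_or, Bool.or_true, Bool.or_false,
        if_true, if_false, Bool.false_eq_true, Bool.true_eq_false, ite_false, ite_true,
        Option.isSome_some, Option.isSome_none]
    -- in each case either x is prepended to exactly one bucket (use perm_middle), or to none
    all_goals
      first
      | exact ih
      | (refine List.Perm.trans ?_ (ih.cons x)
         first
         | (simp only [List.cons_append]; exact List.Perm.refl _)
         | (simpa [List.append_assoc] using
             List.perm_middle (l₁ := t.filter pCh) (a := x)
               (l₂ := t.filter pAux ++ t.filter pBus ++ t.filter pMain))
         | (simpa [List.append_assoc] using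
             List.perm_middle (l₁ := t.filter pCh ++ t.filter pAux) (a := x)
               (l₂ := t.filter pBus ++ t.filter pMain))
         | (simpa [List.append_assoc] using
             List.perm_middle (l₁ := t.filter pCh ++ t.filter pAux ++ t.filter pBus) (a := x)
               (l₂ := t.filter pMain)))

lemma rLex_trans : ∀ {a b c : String}, rLex a b → rLex b c → rLex a c := by
  intro a b c hab hbc
  rcases hab with h | ⟨h1, h2⟩ <;> rcases hbc with h' | ⟨h1', h2'⟩
  · exact Or.inl (h.trans h')
  · exact Or.inl (h1' ▸ h)
  · exact Or.inl (h1 ▸ h')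
  · exact Or.inr ⟨h1.trans h1', le_trans h2 h2'⟩

lemma rLex_antisymm : ∀ {a b : String}, rLex a b → rLex b a → a = b := by
  intro a b hab hba
  rcases hab with h | ⟨h1, h2⟩ <;> rcases hba with h' | ⟨h1', h2'⟩
  · exact absurd (h.trans h') (lt_irrefl _)
  · exact absurd h (h1' ▸ lt_irrefl _)
  · exact absurd h' (h1 ▸ lt_irrefl _)
  · exact le_antisymm h2 h2'

-- sorted lists with equal multiset content and an antisymmetric pairwise order are equal
lemma eq_of_perm_of_pairwise {α : Type} (r : α → α → Prop)
    (hanti : ∀ {a b : α}, r a b → r b a → a = b) :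
    ∀ (l₁ l₂ : List α), l₁.Perm l₂ → l₁.Pairwise r → l₂.Pairwise r → l₁ = l₂ := by
  intro l₁ l₂ hp h₁ h₂
  exact List.Perm.eq_of_pairwise (fun a b _ _ hab hba => hanti hab hba) h₁ h₂ hp

-- insertBy keeps the accumulator r-pairwise when 'before' decides r
lemma pairwise_insertBy {α : Type} (r : α → α → Prop) (before : α → α → Bool)
    (hb : ∀ a b, before a b = true → r a b) (hnb : ∀ a b, before a b = false → r b a)
    (htrans : ∀ {a b c : α}, r a b → r b c → r a c) (x : α) :
    ∀ acc : List α, acc.Pairwise r → (PySem.List.insertBy before x acc).Pairwise r := by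
  intro acc
  induction acc with
  | nil => intro _; simp [PySem.List.insertBy]
  | cons y ys ih =>
    intro h
    rw [List.pairwise_cons] at h
    by_cases hxy : before x y = true
    · simp only [PySem.List.insertBy, hxy, if_true]
      refine List.pairwise_cons.mpr ⟨?_, List.pairwise_cons.mpr h⟩
      intro z hz
      rcases List.mem_cons.mp hz with rfl | hz
      · exact hb x z hxy
      · exact htrans (hb x y hxy) (h.1 z hz)
    · simp only [PySem.List.insertBy, hxy, if_false]
      refine List.pairwise_cons.mpr ⟨?_, ih h.2⟩
      intro z hz
      rcases (PySem.List.mem_insertBy before x z ys).mp hz with hzx | hz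
      · rw [hzx]; exact hnb x y (Bool.eq_false_iff.mpr hxy)
      · exact h.1 z hz

-- the comparison sorted2 uses, read back as rLex
lemma before_true_rLex (a b : String)
    (h : (decide (rnk a < rnk b) || (!decide (rnk b < rnk a) && decide (a < b))) = true) :
    rLex a b := by
  simp only [Bool.or_eq_true, Bool.and_eq_true, Bool.not_eq_true', decide_eq_true_eq,
    decide_eq_false_iff_not] at h
  rcases h with h | ⟨h1, h2⟩
  · exact Or.inl h
  · rcases lt_trichotomy (rnk a) (rnk b) with hlt | heq | hgt
    · exact Or.inl hlt
    · exact Or.inr ⟨heq, le_of_lt h2⟩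
    · exact absurd hgt h1

lemma before_false_rLex (a b : String)
    (h : (decide (rnk a < rnk b) || (!decide (rnk b < rnk a) && decide (a < b))) = false) :
    rLex b a := by
  simp only [Bool.or_eq_false_iff, Bool.and_eq_false_iff, Bool.not_eq_false',
    decide_eq_false_iff_not, decide_eq_true_eq] at h
  rcases h with ⟨h1, h2⟩
  rcases lt_trichotomy (rnk a) (rnk b) with hlt | heq | hgt
  · exact absurd hlt h1
  · rcases h2 with h2 | h2
    · exact absurd h2 (heq ▸ lt_irrefl _)
    · exact Or.inr ⟨heq.symm, le_of_not_gt h2⟩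
  · exact Or.inl hgt

-- B's single keyed sort is rLex-pairwise
lemma sorted2_pairwise_rLex (xs : List String) :
    (PySem.List.sorted2 xs rnk (fun c => c) false).Pairwise rLex := by
  have key : ∀ (l acc : List String), acc.Pairwise rLex →
      (l.foldl (fun acc x => PySem.List.insertBy (fun a b =>
        decide (rnk a < rnk b) || (!decide (rnk b < rnk a) && decide (a < b))) x acc) acc).Pairwise rLex := by
    intro l
    induction l with
    | nil => exact fun acc h => h
    | cons x t ih =>
      intro acc h
      exact ih _ (pairwise_insertBy rLex _ before_true_rLex before_false_rLex
        (fun h1 h2 => rLex_trans h1 h2) x acc h)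
  exact key xs [] List.Pairwise.nil

-- a sorted bucket whose members all share one rank is rLex-pairwise
lemma pairwise_rLex_sorted_of_const (p : String → Bool) (v : Int)
    (hv : ∀ c, p c = true → rnk c = v) (xs : List String) :
    (PySem.List.sorted (xs.filter p) (fun x => x) false).Pairwise rLex := by
  have hs := PySem.List.sorted_pairwise (xs := xs.filter p) (key := fun x => x)
  refine hs.imp_of_mem ?_
  intro a b ha hb hle
  have ha' := (List.mem_filter.mp ((PySem.List.mem_sorted _ _ _ _).mp ha)).2
  have hb' := (List.mem_filter.mp ((PySem.List.mem_sorted _ _ _ _).mp hb)).2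
  exact Or.inr ⟨(hv a ha').trans (hv b hb').symm, hle⟩

lemma mem_sorted_filter {p : String → Bool} {xs : List String} {c : String}
    (h : c ∈ PySem.List.sorted (xs.filter p) (fun x => x) false) : p c = true :=
  (List.mem_filter.mp ((PySem.List.mem_sorted _ _ _ _).mp h)).2

-- members of two buckets with strictly increasing ranks are rLex-related
lemma cross_rLex {pa pb : String → Bool} {va vb : Int} {xs : List String}
    (hva : ∀ c, pa c = true → rnk c = va) (hvb : ∀ c, pb c = true → rnk c = vb)
    (hlt : va < vb) {a b : String}
    (ha : a ∈ PySem.List.sorted (xs.filter pa) (fun x => x) false)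
    (hb : b ∈ PySem.List.sorted (xs.filter pb) (fun x => x) false) : rLex a b :=
  Or.inl (by rw [hva a (mem_sorted_filter ha), hvb b (mem_sorted_filter hb)]; exact hlt)

-- ===== VERDICT (by name: the statement is the Claim_ definition above) =====
theorem sort_controls_spec : Claim_equal_sort_controls := by
  intro cl _
  unfold Spec_sort_controls sort_controls sort_controls_alt
  simp only [foldl_stepA cl [] [] [] [], List.nil_append]
  show _ = PySem.List.sorted2 (cl.filter (fun c => (pvRank? c).isSome)) rnk (fun c => c) false
  refine eq_of_perm_of_pairwise rLex (fun hab hba => rLex_antisymm hab hba) _ _ ?_ ?_ ?_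
  · -- both sides are permutations of the filtered list
    have p1 : (PySem.List.sorted (cl.filter pCh) (fun x => x) false ++
        PySem.List.sorted (cl.filter pAux) (fun x => x) false ++
        PySem.List.sorted (cl.filter pBus) (fun x => x) false ++
        PySem.List.sorted (cl.filter pMain) (fun x => x) false).Perm
        (cl.filter pCh ++ cl.filter pAux ++ cl.filter pBus ++ cl.filter pMain) :=
      ((((PySem.List.sorted_perm _ _ _).append (PySem.List.sorted_perm _ _ _)).append
        (PySem.List.sorted_perm _ _ _)).append (PySem.List.sorted_perm _ _ _))
    exact (p1.trans (four_filters_perm cl)).trans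
      (PySem.List.sorted2_perm (cl.filter (fun c => (pvRank? c).isSome)) rnk (fun c => c) false).symm
  · -- A's concatenation of sorted buckets is rLex-pairwise
    refine List.pairwise_append.mpr ⟨List.pairwise_append.mpr ⟨List.pairwise_append.mpr
      ⟨pairwise_rLex_sorted_of_const pCh 0 (fun c h => rnk_of_pCh h) cl,
       pairwise_rLex_sorted_of_const pAux 1 (fun c h => rnk_of_pAux h) cl, ?_⟩,
       pairwise_rLex_sorted_of_const pBus 2 (fun c h => rnk_of_pBus h) cl, ?_⟩,
       pairwise_rLex_sorted_of_const pMain 3 (fun c h => rnk_of_pMain h) cl, ?_⟩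
    · intro a ha b hb
      exact cross_rLex (fun c h => rnk_of_pCh h) (fun c h => rnk_of_pAux h)
        (by norm_num) ha hb
    · intro a ha b hb
      rcases List.mem_append.mp ha with ha | ha
      · exact cross_rLex (fun c h => rnk_of_pCh h) (fun c h => rnk_of_pBus h)
          (by norm_num) ha hb
      · exact cross_rLex (fun c h => rnk_of_pAux h) (fun c h => rnk_of_pBus h)
          (by norm_num) ha hb
    · intro a ha b hb
      rcases List.mem_append.mp ha with ha | ha
      · rcases List.mem_append.mp ha with ha | ha
        · exact cross_rLex (fun c h => rnk_of_pCh h) (fun c h => rnk_of_pMain h)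
            (by norm_num) ha hb
        · exact cross_rLex (fun c h => rnk_of_pAux h) (fun c h => rnk_of_pMain h)
            (by norm_num) ha hb
      · exact cross_rLex (fun c h => rnk_of_pBus h) (fun c h => rnk_of_pMain h)
          (by norm_num) ha hb
  · exact sorted2_pairwise_rLex _
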